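-- pv_equiv track=rewrite | github.com/ericksoa/agentic-evolve | showcase/code-golf/178fcbfb/solution.py | solve
-- ===== SOURCE A (Python) =====
-- def solve(g):
--  R,C=len(g),len(g[0]);o=[r[:]for r in g]
--  for i in range(R):
--   for j in range(C):
--    if g[i][j]==2:
--     for k in range(R):
--      if o[k][j]==0:o[k][j]=2
--  for i in range(R):
--   for j in range(C):
--    v=g[i][j]
--    if v in(1,3):
--     for k in range(C):
--      if o[i][k] in(0,2):o[i][k]=v
--  return o
-- ===== SOURCE B (Python) =====
-- def solve(g):
--     R, C = len(g), len(g[0])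
--     col2 = [any(g[i][j] == 2 for i in range(R)) for j in range(C)]
--     out = [row[:] for row in g]
--     for i in range(R):
--         row = g[i]
--         v = next((row[j] for j in range(C) if row[j] in (1, 3)), None)
--         for j in range(C):
--             x = row[j]
--             if v is not None:
--                 if x in (0, 2):
--                     out[i][j] = v
--             elif x == 0 and col2[j]:
--                 out[i][j] = 2
--     return out
-- ===== Notes on version B (the rewrite author's own statement) =====
-- stated objective: alternative
-- what changed: A floods the whole column for every 2-cell and then re-floods the whole row for every 1/3-cell, revisiting cells many times; B precomputes per-column has-a-2 flags and each row's first 1-or-3 value once and then writes each cell at most once in a single pass; Pre_ excludes only the inputs on which A raises IndexError (empty grid, or a row shorter than row 0).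
import Mathlib
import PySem

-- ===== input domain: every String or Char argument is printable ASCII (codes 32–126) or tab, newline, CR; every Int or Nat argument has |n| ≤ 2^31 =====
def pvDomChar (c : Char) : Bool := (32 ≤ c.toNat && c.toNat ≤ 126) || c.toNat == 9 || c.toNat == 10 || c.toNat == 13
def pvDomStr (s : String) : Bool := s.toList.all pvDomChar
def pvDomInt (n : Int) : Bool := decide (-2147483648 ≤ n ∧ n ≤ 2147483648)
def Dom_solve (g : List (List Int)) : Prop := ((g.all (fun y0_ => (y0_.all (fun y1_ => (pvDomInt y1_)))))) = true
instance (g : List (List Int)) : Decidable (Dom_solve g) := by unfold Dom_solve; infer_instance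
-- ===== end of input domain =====

-- B replaces A's repeated column/row flood loops by one precomputation of per-column
-- has-a-2 flags and each row's first 1-or-3 value followed by a single fill pass.

-- ===== PORT A =====
-- cell read o[i][j] / g[i][j]: indices produced by range are in bounds on Pre_, so getD's default is never hit
def pvCell (o : List (List Int)) (i j : Nat) : Int := (o.getD i []).getD j 0
-- in-place assignment o[i][j] := x
def pvSet (o : List (List Int)) (i j : Nat) (x : Int) : List (List Int) :=
  o.set i ((o.getD i []).set j x)

-- `for k in range(R): if o[k][j]==0: o[k][j]=2`
def fillCol (R j : Nat) (o : List (List Int)) : List (List Int) :=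
  (List.range R).foldl (fun o k => if pvCell o k j == 0 then pvSet o k j 2 else o) o

-- body of the first `for i in range(R)` loop
def pass1Body (g : List (List Int)) (R C : Nat) (o : List (List Int)) (i : Nat) : List (List Int) :=
  (List.range C).foldl (fun o j => if pvCell g i j == 2 then fillCol R j o else o) o

-- `for k in range(C): if o[i][k] in (0,2): o[i][k]=v`
def fillRow (C i : Nat) (v : Int) (o : List (List Int)) : List (List Int) :=
  (List.range C).foldl (fun o k => if pvCell o i k == 0 || pvCell o i k == 2 then pvSet o i k v else o) o

-- body of the second `for i in range(R)` loop
def pass2Body (g : List (List Int)) (C : Nat) (o : List (List Int)) (i : Nat) : List (List Int) :=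
  (List.range C).foldl (fun o j =>
    let v := pvCell g i j
    if v == 1 || v == 3 then fillRow C i v o else o) o

def solve (g : List (List Int)) : List (List Int) :=
  let R := g.length
  let C := (g.headD []).length        -- len(g[0]); Pre_ guarantees g ≠ []
  let o := g.map (fun r => r)         -- o = [r[:] for r in g]
  let o1 := (List.range R).foldl (fun o i => pass1Body g R C o i) o
  (List.range R).foldl (fun o i => pass2Body g C o i) o1

-- ===== PORT B =====
def solve_alt (g : List (List Int)) : List (List Int) :=
  let R := g.length
  let C := (g.headD []).length        -- R, C = len(g), len(g[0])
  -- col2 = [any(g[i][j] == 2 for i in range(R)) for j in range(C)]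
  let col2 := (List.range C).map (fun j => (List.range R).any (fun i => (g.getD i []).getD j 0 == 2))
  let out := g.map (fun row => row)   -- out = [row[:] for row in g]
  (List.range R).foldl (fun out i =>
    let row := g.getD i []
    -- v = next((row[j] for j in range(C) if row[j] in (1, 3)), None)
    let v := ((List.range C).map (fun j => row.getD j 0)).find? (fun x => x == 1 || x == 3)
    (List.range C).foldl (fun out j =>
      let x := row.getD j 0
      match v with
      | some v => if x == 0 || x == 2 then pvSet out i j v else out
      | none => if x == 0 && col2.getD j false then pvSet out i j 2 else out) out) out

-- ===== PRECONDITION & SPEC =====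
-- Pre_ excludes exactly the inputs on which A raises: the empty grid (g[0] is an
-- IndexError) and grids with a row shorter than row 0 (g[i][j] / o[k][j] raises
-- for some j < len(g[0])).  A returns on every other input.
def Pre_solve (g : List (List Int)) : Prop :=
  g ≠ [] ∧ ∀ r ∈ g, (g.headD []).length ≤ r.length
instance (g : List (List Int)) : Decidable (Pre_solve g) := by unfold Pre_solve; infer_instance

def pvWitness_solve : List (List Int) := [[2, 0, 1], [0, 0, 0], [3, 2, 0]]

def Spec_solve (g : List (List Int)) (out : List (List Int)) : Prop := out = solve_alt g
instance (g : List (List Int)) (out : List (List Int)) : Decidable (Spec_solve g out) := by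
  unfold Spec_solve; infer_instance

-- ===== CLAIM (what is proved, stated in full; the proofs are below) =====
def Claim_equal_solve : Prop := ∀ (g : List (List Int)), Dom_solve g → Pre_solve g → Spec_solve g (solve g)

-- ===== LEMMAS AND PROOFS =====

-- o has the same outline (row count and row lengths) as g
def pvShape (g o : List (List Int)) : Prop :=
  o.length = g.length ∧ ∀ i, (o.getD i []).length = (g.getD i []).length

theorem pv_getD_pvSet (o : List (List Int)) (i j : Nat) (x : Int) (i' : Nat) :
    (pvSet o i j x).getD i' [] = if i' = i then (o.getD i []).set j x else o.getD i' [] := by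
  unfold pvSet
  by_cases h : i' = i
  · subst h
    by_cases hi : i' < o.length
    · simp [List.getD_eq_getElem?_getD, List.getElem?_set, hi]
    · rw [List.set_eq_of_length_le (by omega)]
      have hnone : o[i']? = none := by
        rw [List.getElem?_eq_none_iff]; omega
      simp [List.getD_eq_getElem?_getD, hnone]
  · simp [List.getD_eq_getElem?_getD, List.getElem?_set, h, Ne.symm h]

theorem pv_rowlen_pvSet (o : List (List Int)) (i j : Nat) (x : Int) (i' : Nat) :
    ((pvSet o i j x).getD i' []).length = (o.getD i' []).length := by
  rw [pv_getD_pvSet]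
  split
  · next h => subst h; simp
  · rfl

theorem pv_cell_pvSet (o : List (List Int)) (i j : Nat) (x : Int) (i' j' : Nat) :
    pvCell (pvSet o i j x) i' j' =
      if i' = i ∧ j' = j ∧ j < (o.getD i []).length then x else pvCell o i' j' := by
  unfold pvCell
  rw [pv_getD_pvSet]
  by_cases h : i' = i
  · subst h
    by_cases hj : j' = j
    · subst hj
      by_cases hlt : j' < (o.getD i' []).length
      · rw [List.getD_eq_getElem?_getD] at hlt ⊢
        simp [List.getElem?_set, hlt]
      · rw [List.set_eq_of_length_le (by omega)]
        rw [List.getD_eq_getElem?_getD] at hlt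
        simp [List.getD_eq_getElem?_getD, hlt]
    · simp [List.getD_eq_getElem?_getD, List.getElem?_set, hj, Ne.symm hj]
  · simp [h]

theorem pvShape_pvSet (g o : List (List Int)) (i j : Nat) (x : Int) (h : pvShape g o) :
    pvShape g (pvSet o i j x) := by
  refine ⟨?_, fun i' => ?_⟩
  · simpa [pvSet] using h.1
  · rw [pv_rowlen_pvSet]; exact h.2 i'

theorem pre_rowlen (g : List (List Int)) (hPre : Pre_solve g) (i : Nat) (hi : i < g.length) :
    (g.headD []).length ≤ (g.getD i []).length := by
  have := hPre.2 (g.getD i []) (by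
    rw [List.getD_eq_getElem g [] hi]
    exact List.getElem_mem hi)
  omega

-- fillCol over an arbitrary index list, cell by cell
theorem fillCol_cells (g : List (List Int)) (hPre : Pre_solve g) (j : Nat)
    (hj : j < (g.headD []).length) (l : List Nat) (o : List (List Int)) (hsh : pvShape g o) :
    pvShape g (l.foldl (fun o k => if pvCell o k j == 0 then pvSet o k j 2 else o) o) ∧
    ∀ i' j', pvCell (l.foldl (fun o k => if pvCell o k j == 0 then pvSet o k j 2 else o) o) i' j' =
      if i' ∈ l ∧ i' < g.length ∧ j' = j ∧ pvCell o i' j = 0 then 2 else pvCell o i' j' := by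
  induction l generalizing o with
  | nil => exact ⟨hsh, by simp⟩
  | cons k t ih =>
    simp only [List.foldl_cons]
    have hkiff : j < (o.getD k []).length ↔ k < g.length := by
      rw [hsh.2 k]
      constructor
      · intro h
        by_contra hk
        rw [List.getD_eq_default _ _ (by omega : g.length ≤ k)] at h
        simp at h
      · intro hk
        have h1 := pre_rowlen g hPre k hk
        omega
    by_cases h0 : pvCell o k j = 0
    · rw [if_pos (by simpa using h0)]
      obtain ⟨sh2, hc⟩ := ih (pvSet o k j 2) (pvShape_pvSet g o k j 2 hsh)
      refine ⟨sh2, fun i' j' => ?_⟩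
      rw [hc]
      simp only [pv_cell_pvSet, hkiff, List.mem_cons]
      by_cases hj' : j' = j <;> by_cases hi'k : i' = k <;>
        split_ifs <;> simp_all <;> omega
    · rw [if_neg (by simpa using h0)]
      obtain ⟨sh2, hc⟩ := ih o hsh
      refine ⟨sh2, fun i' j' => ?_⟩
      rw [hc]
      simp only [List.mem_cons]
      by_cases hj' : j' = j <;> by_cases hi'k : i' = k <;>
        split_ifs <;> simp_all <;> omega

-- the first pass, row by row then as a whole
theorem pass1Body_cells (g : List (List Int)) (hPre : Pre_solve g) (i : Nat)
    (l : List Nat) (hl : ∀ j ∈ l, j < (g.headD []).length) (o : List (List Int)) (hsh : pvShape g o) :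
    pvShape g (l.foldl (fun o j => if pvCell g i j == 2 then fillCol g.length j o else o) o) ∧
    ∀ i' j', pvCell (l.foldl (fun o j => if pvCell g i j == 2 then fillCol g.length j o else o) o) i' j' =
      if j' ∈ l ∧ pvCell g i j' = 2 ∧ i' < g.length ∧ pvCell o i' j' = 0 then 2 else pvCell o i' j' := by
  induction l generalizing o with
  | nil => exact ⟨hsh, by simp⟩
  | cons j0 t ih =>
    simp only [List.foldl_cons]
    have hj0 : j0 < (g.headD []).length := hl j0 (by simp)
    have hlt : ∀ j ∈ t, j < (g.headD []).length := fun j hj => hl j (by simp [hj])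
    by_cases h2 : pvCell g i j0 = 2
    · rw [if_pos (by simpa using h2)]
      obtain ⟨shF, hF⟩ := fillCol_cells g hPre j0 hj0 (List.range g.length) o hsh
      obtain ⟨sh2, hc⟩ := ih hlt (fillCol g.length j0 o) (by unfold fillCol; exact shF)
      refine ⟨sh2, fun i' j' => ?_⟩
      rw [hc]
      simp only [fillCol]
      rw [hF i' j']
      simp only [List.mem_range, List.mem_cons]
      by_cases hj' : j' = j0 <;> split_ifs <;> simp_all <;> omega
    · rw [if_neg (by simpa using h2)]
      obtain ⟨sh2, hc⟩ := ih hlt o hsh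
      refine ⟨sh2, fun i' j' => ?_⟩
      rw [hc]
      simp only [List.mem_cons]
      by_cases hj' : j' = j0 <;> split_ifs <;> simp_all <;> omega

theorem pass1_cells (g : List (List Int)) (hPre : Pre_solve g)
    (l : List Nat) (o : List (List Int)) (hsh : pvShape g o) :
    pvShape g (l.foldl (fun o i => pass1Body g g.length (g.headD []).length o i) o) ∧
    ∀ i' j', pvCell (l.foldl (fun o i => pass1Body g g.length (g.headD []).length o i) o) i' j' =
      if j' < (g.headD []).length ∧ (∃ i ∈ l, pvCell g i j' = 2) ∧ i' < g.length ∧ pvCell o i' j' = 0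
      then 2 else pvCell o i' j' := by
  induction l generalizing o with
  | nil => exact ⟨hsh, by simp⟩
  | cons i0 t ih =>
    simp only [List.foldl_cons]
    obtain ⟨sh1, h1⟩ := pass1Body_cells g hPre i0 (List.range (g.headD []).length)
      (by simp) o hsh
    obtain ⟨sh2, hc⟩ := ih (pass1Body g g.length (g.headD []).length o i0)
      (by unfold pass1Body; exact sh1)
    refine ⟨sh2, fun i' j' => ?_⟩
    rw [hc]
    simp only [pass1Body]
    rw [h1 i' j']
    simp only [List.mem_range, List.mem_cons]
    by_cases hC : j' < (g.headD []).length <;>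
      by_cases hlen : i' < g.length <;>
      by_cases h0 : pvCell o i' j' = 0 <;>
      by_cases hg0 : pvCell g i0 j' = 2 <;>
      by_cases hex : ∃ i ∈ t, pvCell g i j' = 2 <;>
      simp_all

-- fillRow over an arbitrary index list
set_option maxHeartbeats 1600000 in
theorem fillRow_cells (g : List (List Int)) (hPre : Pre_solve g) (i : Nat) (v : Int)
    (l : List Nat) (hl : ∀ k ∈ l, k < (g.headD []).length) (o : List (List Int)) (hsh : pvShape g o) :
    pvShape g (l.foldl (fun o k => if pvCell o i k == 0 || pvCell o i k == 2 then pvSet o i k v else o) o) ∧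
    ∀ i' j', pvCell (l.foldl (fun o k => if pvCell o i k == 0 || pvCell o i k == 2 then pvSet o i k v else o) o) i' j' =
      if i' = i ∧ i < g.length ∧ j' ∈ l ∧ (pvCell o i j' = 0 ∨ pvCell o i j' = 2) then v
      else pvCell o i' j' := by
  induction l generalizing o with
  | nil => exact ⟨hsh, by simp⟩
  | cons k t ih =>
    simp only [List.foldl_cons]
    have hlt : ∀ j ∈ t, j < (g.headD []).length := fun j hj => hl j (by simp [hj])
    have hkiff : k < (o.getD i []).length ↔ i < g.length := by
      rw [hsh.2 i]
      constructor
      · intro h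
        by_contra hi
        rw [List.getD_eq_default _ _ (by omega : g.length ≤ i)] at h
        simp at h
      · intro hi
        have h1 := pre_rowlen g hPre i hi
        have h2 := hl k (by simp)
        omega
    by_cases htr : pvCell o i k = 0 ∨ pvCell o i k = 2
    · rw [if_pos (by rcases htr with h | h <;> simp [h])]
      obtain ⟨sh2, hc⟩ := ih hlt (pvSet o i k v) (pvShape_pvSet g o i k v hsh)
      refine ⟨sh2, fun i' j' => ?_⟩
      rw [hc]
      simp only [pv_cell_pvSet, hkiff, List.mem_cons]
      by_cases hj' : j' = k <;> by_cases hi' : i' = i <;>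
        split_ifs <;> simp_all <;> omega
    · rw [if_neg (by simpa using htr)]
      obtain ⟨sh2, hc⟩ := ih hlt o hsh
      refine ⟨sh2, fun i' j' => ?_⟩
      rw [hc]
      simp only [List.mem_cons]
      by_cases hj' : j' = k <;> by_cases hi' : i' = i <;>
        split_ifs <;> simp_all <;> omega

theorem fillRow_noop (i : Nat) (v : Int) (l : List Nat) (o : List (List Int))
    (h : ∀ k ∈ l, ¬(pvCell o i k = 0 ∨ pvCell o i k = 2)) :
    l.foldl (fun o k => if pvCell o i k == 0 || pvCell o i k == 2 then pvSet o i k v else o) o = o := by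
  induction l with
  | nil => rfl
  | cons k t ih =>
    have hk := h k (by simp)
    simp only [List.foldl_cons]
    rw [if_neg (by simpa using hk)]
    exact ih (fun k' hk' => h k' (by simp [hk']))

theorem pvSet_out (o : List (List Int)) (i j : Nat) (x : Int) (h : o.length ≤ i) :
    pvSet o i j x = o := by
  unfold pvSet
  exact List.set_eq_of_length_le h

theorem fillRow_out (i : Nat) (v : Int) (l : List Nat) (o : List (List Int))
    (h : o.length ≤ i) :
    l.foldl (fun o k => if pvCell o i k == 0 || pvCell o i k == 2 then pvSet o i k v else o) o = o := by
  induction l with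
  | nil => rfl
  | cons k t ih =>
    simp only [List.foldl_cons]
    split
    · rw [pvSet_out o i k v h]; exact ih
    · exact ih

theorem pass2Body_noop (g : List (List Int)) (i : Nat) (l : List Nat) (o : List (List Int))
    (h : ∀ k, k < (g.headD []).length → ¬(pvCell o i k = 0 ∨ pvCell o i k = 2)) :
    l.foldl (fun o j => if pvCell g i j == 1 || pvCell g i j == 3 then fillRow (g.headD []).length i (pvCell g i j) o else o) o = o := by
  induction l with
  | nil => rfl
  | cons j0 t ih =>
    simp only [List.foldl_cons]
    have hfix : fillRow (g.headD []).length i (pvCell g i j0) o = o := by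
      unfold fillRow
      exact fillRow_noop i (pvCell g i j0) _ o (fun k hk => h k (by simpa using hk))
    split
    · rw [hfix]; exact ih
    · exact ih

theorem pass2Body_cells (g : List (List Int)) (hPre : Pre_solve g) (i : Nat)
    (l : List Nat) (hl : ∀ j ∈ l, j < (g.headD []).length) (o : List (List Int)) (hsh : pvShape g o) :
    pvShape g (l.foldl (fun o j => if pvCell g i j == 1 || pvCell g i j == 3 then fillRow (g.headD []).length i (pvCell g i j) o else o) o) ∧
    ∀ i' j', pvCell (l.foldl (fun o j => if pvCell g i j == 1 || pvCell g i j == 3 then fillRow (g.headD []).length i (pvCell g i j) o else o) o) i' j' =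
      match (l.map (fun j => pvCell g i j)).find? (fun v => v == 1 || v == 3) with
      | none => pvCell o i' j'
      | some v =>
        if i' = i ∧ i < g.length ∧ j' < (g.headD []).length ∧ (pvCell o i j' = 0 ∨ pvCell o i j' = 2)
        then v else pvCell o i' j' := by
  induction l generalizing o with
  | nil => exact ⟨hsh, by simp⟩
  | cons j0 t ih =>
    simp only [List.foldl_cons, List.map_cons]
    have hlt : ∀ j ∈ t, j < (g.headD []).length := fun j hj => hl j (by simp [hj])
    by_cases hv : pvCell g i j0 = 1 ∨ pvCell g i j0 = 3
    · rw [if_pos (by rcases hv with h | h <;> simp [h])]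
      rw [List.find?_cons_of_pos (by rcases hv with h | h <;> simp [h])]
      obtain ⟨shF, hF⟩ := fillRow_cells g hPre i (pvCell g i j0) (List.range (g.headD []).length)
        (by simp) o hsh
      have shF' : pvShape g (fillRow (g.headD []).length i (pvCell g i j0) o) := by
        unfold fillRow; exact shF
      have hF' : ∀ a b, pvCell (fillRow (g.headD []).length i (pvCell g i j0) o) a b =
          if a = i ∧ i < g.length ∧ b ∈ List.range (g.headD []).length ∧
            (pvCell o i b = 0 ∨ pvCell o i b = 2)
          then pvCell g i j0 else pvCell o a b := hF
      by_cases hi : i < g.length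
      · have hnoop : t.foldl (fun o j => if pvCell g i j == 1 || pvCell g i j == 3 then fillRow (g.headD []).length i (pvCell g i j) o else o)
            (fillRow (g.headD []).length i (pvCell g i j0) o) = fillRow (g.headD []).length i (pvCell g i j0) o := by
          apply pass2Body_noop
          intro k hk
          rw [hF' i k]
          simp only [List.mem_range]
          rcases hv with h | h <;> split_ifs <;> simp_all
        refine ⟨by rw [hnoop]; exact shF', fun i' j' => ?_⟩
        rw [hnoop, hF' i' j']
        simp only [List.mem_range]
      · have ho' : fillRow (g.headD []).length i (pvCell g i j0) o = o := by
          unfold fillRow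
          exact fillRow_out i (pvCell g i j0) _ o (by rw [hsh.1]; omega)
        rw [ho']
        obtain ⟨sh2, hc⟩ := ih hlt o hsh
        refine ⟨sh2, fun i' j' => ?_⟩
        rw [hc]
        cases hf : (t.map (fun j => pvCell g i j)).find? (fun v => v == 1 || v == 3) <;>
          simp [hi]
    · rw [if_neg (by simpa using hv)]
      rw [List.find?_cons_of_neg (by simpa using hv)]
      obtain ⟨sh2, hc⟩ := ih hlt o hsh
      exact ⟨sh2, fun i' j' => hc i' j'⟩

set_option maxHeartbeats 3200000 in
theorem pass2_cells (g : List (List Int)) (hPre : Pre_solve g)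
    (l : List Nat) (o : List (List Int)) (hsh : pvShape g o) :
    pvShape g (l.foldl (fun o i => pass2Body g (g.headD []).length o i) o) ∧
    ∀ i' j', pvCell (l.foldl (fun o i => pass2Body g (g.headD []).length o i) o) i' j' =
      match ((List.range (g.headD []).length).map (fun j => pvCell g i' j)).find? (fun v => v == 1 || v == 3) with
      | none => pvCell o i' j'
      | some v =>
        if i' ∈ l ∧ i' < g.length ∧ j' < (g.headD []).length ∧ (pvCell o i' j' = 0 ∨ pvCell o i' j' = 2)
        then v else pvCell o i' j' := by
  induction l generalizing o with
  | nil =>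
    refine ⟨hsh, fun i' j' => ?_⟩
    rcases hf : ((List.range (g.headD []).length).map (fun j => pvCell g i' j)).find? (fun v => v == 1 || v == 3) with _ | v <;> simp
  | cons i0 t ih =>
    simp only [List.foldl_cons]
    obtain ⟨sh1, h1⟩ := pass2Body_cells g hPre i0 (List.range (g.headD []).length) (by simp) o hsh
    have sh1' : pvShape g (pass2Body g (g.headD []).length o i0) := sh1
    have h1' : ∀ a b, pvCell (pass2Body g (g.headD []).length o i0) a b =
        match ((List.range (g.headD []).length).map (fun j => pvCell g i0 j)).find? (fun v => v == 1 || v == 3) with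
        | none => pvCell o a b
        | some v =>
          if a = i0 ∧ i0 < g.length ∧ b < (g.headD []).length ∧ (pvCell o i0 b = 0 ∨ pvCell o i0 b = 2)
          then v else pvCell o a b := h1
    obtain ⟨sh2, hc⟩ := ih (pass2Body g (g.headD []).length o i0) sh1'
    refine ⟨sh2, fun i' j' => ?_⟩
    rw [hc]
    by_cases hii : i' = i0
    · subst hii
      rw [h1' i' j']
      rcases hf : ((List.range (g.headD []).length).map (fun j => pvCell g i' j)).find? (fun v => v == 1 || v == 3) with _ | v
      · simp
      · have hpred : v = 1 ∨ v = 3 := by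
          have := List.find?_some hf
          simpa using this
        by_cases hlen : i' < g.length <;>
          by_cases hC : j' < (g.headD []).length <;>
          by_cases h0 : pvCell o i' j' = 0 <;>
          by_cases h2 : pvCell o i' j' = 2 <;>
          by_cases hit : i' ∈ t <;>
          rcases hpred with h13 | h13 <;>
          simp_all [List.mem_cons]
    · have hcP : pvCell (pass2Body g (g.headD []).length o i0) i' j' = pvCell o i' j' := by
        rw [h1' i' j']
        rcases hf : ((List.range (g.headD []).length).map (fun j => pvCell g i0 j)).find? (fun v => v == 1 || v == 3) with _ | v <;> simp [hii]
      rw [hcP]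
      rcases hf : ((List.range (g.headD []).length).map (fun j => pvCell g i' j)).find? (fun v => v == 1 || v == 3) with _ | v <;> simp [List.mem_cons, hii]

-- closed forms used to meet in the middle
def step1 (g : List (List Int)) (i j : Nat) : Int :=
  if j < (g.headD []).length ∧ i < g.length ∧ g.any (fun row => row.getD j 0 == 2) = true ∧ pvCell g i j = 0
  then 2 else pvCell g i j

def finalCell (g : List (List Int)) (i j : Nat) : Int :=
  match ((g.getD i []).take (g.headD []).length).find? (fun v => v == 1 || v == 3) with
  | none => step1 g i j
  | some v =>
    if i < g.length ∧ j < (g.headD []).length ∧ (step1 g i j = 0 ∨ step1 g i j = 2)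
    then v else step1 g i j

theorem colAny_iff (g : List (List Int)) (j : Nat) :
    g.any (fun row => row.getD j 0 == 2) = true ↔ ∃ i0 ∈ List.range g.length, pvCell g i0 j = 2 := by
  rw [List.any_eq_true]
  constructor
  · rintro ⟨row, hrow, hp⟩
    obtain ⟨k, hk, hkeq⟩ := List.mem_iff_getElem.mp hrow
    refine ⟨k, by simpa using hk, ?_⟩
    unfold pvCell
    rw [List.getD_eq_getElem g [] hk, hkeq]
    simpa using hp
  · rintro ⟨k, hk, hp⟩
    have hk' : k < g.length := by simpa using hk
    refine ⟨g[k], List.getElem_mem hk', ?_⟩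
    unfold pvCell at hp
    rw [List.getD_eq_getElem g [] hk'] at hp
    simpa using hp

theorem solve_cells (g : List (List Int)) (hPre : Pre_solve g) :
    pvShape g (solve g) ∧ ∀ i j, pvCell (solve g) i j = finalCell g i j := by
  have e : solve g = (List.range g.length).foldl (fun o i => pass2Body g (g.headD []).length o i)
      ((List.range g.length).foldl (fun o i => pass1Body g g.length (g.headD []).length o i) g) := by
    unfold solve
    rw [List.map_id']
  rw [e]
  obtain ⟨sh1, h1⟩ := pass1_cells g hPre (List.range g.length) g ⟨rfl, fun i => rfl⟩
  obtain ⟨sh2, h2⟩ := pass2_cells g hPre (List.range g.length) _ sh1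
  refine ⟨sh2, fun i j => ?_⟩
  rw [h2 i j, h1 i j]
  have hX : (if j < (g.headD []).length ∧ (∃ i0 ∈ List.range g.length, pvCell g i0 j = 2) ∧
      i < g.length ∧ pvCell g i j = 0 then 2 else pvCell g i j) = step1 g i j := by
    unfold step1
    refine if_congr ?_ rfl rfl
    have hc := colAny_iff g j
    constructor
    · rintro ⟨hA, hB, hC2, hD⟩
      exact ⟨hA, hC2, hc.mpr hB, hD⟩
    · rintro ⟨hA, hC2, hB, hD⟩
      exact ⟨hA, hc.mp hB, hC2, hD⟩
  rw [hX]
  unfold finalCell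
  by_cases hi : i < g.length
  · have hCle := pre_rowlen g hPre i hi
    have hrow : (List.range (g.headD []).length).map (fun j => pvCell g i j) =
        (g.getD i []).take (g.headD []).length := by
      apply List.ext_getElem
      · rw [List.length_map, List.length_range, List.length_take]
        omega
      · intro k hk1 hk2
        have hkC : k < (g.headD []).length := by simpa using hk1
        simp only [List.getElem_map, List.getElem_range, List.getElem_take]
        unfold pvCell
        rw [List.getD_eq_getElem (g.getD i []) 0 (by omega)]
    rw [hrow]
    rcases hf : ((g.getD i []).take (g.headD []).length).find? (fun v => v == 1 || v == 3) with _ | v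
    · rfl
    · simp [List.mem_range, hi]
  · have hrow_nil : g.getD i [] = [] := List.getD_eq_default _ _ (by omega)
    have hs1 : ((List.range (g.headD []).length).map (fun j => pvCell g i j)).find?
        (fun v => v == 1 || v == 3) = none := by
      rw [List.find?_eq_none]
      intro x hx
      obtain ⟨j0, _, rfl⟩ := List.mem_map.mp hx
      unfold pvCell
      rw [hrow_nil]
      simp
    rw [hs1, hrow_nil]
    simp

-- the first 1-or-3 of a list, written the way B computes it from contains/index
theorem finalCell_eq_some (g : List (List Int)) (i j : Nat) (v : Int)
    (h : ((g.getD i []).take (g.headD []).length).find? (fun v => v == 1 || v == 3) = some v) :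
    finalCell g i j = if i < g.length ∧ j < (g.headD []).length ∧ (step1 g i j = 0 ∨ step1 g i j = 2)
      then v else step1 g i j := by
  unfold finalCell
  rw [h]

theorem finalCell_eq_none (g : List (List Int)) (i j : Nat)
    (h : ((g.getD i []).take (g.headD []).length).find? (fun v => v == 1 || v == 3) = none) :
    finalCell g i j = step1 g i j := by
  unfold finalCell
  rw [h]

-- the first len(g[0]) cells of row i, as B enumerates them by index
theorem rowMap_take (g : List (List Int)) (hPre : Pre_solve g) (i : Nat) (hi : i < g.length) :
    (List.range (g.headD []).length).map (fun j => (g.getD i []).getD j 0) =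
      (g.getD i []).take (g.headD []).length := by
  have hCle := pre_rowlen g hPre i hi
  apply List.ext_getElem
  · rw [List.length_map, List.length_range, List.length_take]
    omega
  · intro k hk1 hk2
    have hkC : k < (g.headD []).length := by simpa using hk1
    simp only [List.getElem_map, List.getElem_range, List.getElem_take]
    rw [List.getD_eq_getElem (g.getD i []) 0 (by omega)]

-- the data B precomputes, named so the proofs can speak about it
def bV (g : List (List Int)) (i : Nat) : Option Int :=
  ((List.range (g.headD []).length).map (fun j => (g.getD i []).getD j 0)).find?
    (fun x => x == 1 || x == 3)

def bCol2 (g : List (List Int)) (j : Nat) : Bool :=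
  (List.range g.length).any (fun i => (g.getD i []).getD j 0 == 2)

-- whether B writes cell (i, j), and the value it writes
def bP (g : List (List Int)) (i j : Nat) : Bool :=
  match bV g i with
  | some _ => (g.getD i []).getD j 0 == 0 || (g.getD i []).getD j 0 == 2
  | none => ((g.getD i []).getD j 0 == 0) && bCol2 g j

def bW (g : List (List Int)) (i : Nat) : Int :=
  match bV g i with
  | some v => v
  | none => 2

theorem foldl_congr_mem' {α β : Type} (l : List β) (f f' : α → β → α) (a : α)
    (h : ∀ a b, b ∈ l → f a b = f' a b) : l.foldl f a = l.foldl f' a := by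
  induction l generalizing a with
  | nil => rfl
  | cons x t ih =>
    simp only [List.foldl_cons]
    rw [h a x (by simp)]
    exact ih _ (fun a b hb => h a b (by simp [hb]))

-- B's inner loop: write the fixed value w at every cell (i, j), j ∈ l, with p j set
theorem bWrite_cells (g : List (List Int)) (hPre : Pre_solve g) (i : Nat)
    (p : Nat → Bool) (w : Int) (l : List Nat) (hl : ∀ k ∈ l, k < (g.headD []).length)
    (o : List (List Int)) (hsh : pvShape g o) :
    pvShape g (l.foldl (fun o j => if p j then pvSet o i j w else o) o) ∧
    ∀ i' j', pvCell (l.foldl (fun o j => if p j then pvSet o i j w else o) o) i' j' =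
      if i' = i ∧ i < g.length ∧ j' ∈ l ∧ p j' = true then w else pvCell o i' j' := by
  induction l generalizing o with
  | nil => exact ⟨hsh, by simp⟩
  | cons k t ih =>
    simp only [List.foldl_cons]
    have hlt : ∀ j ∈ t, j < (g.headD []).length := fun j hj => hl j (by simp [hj])
    have hkiff : k < (o.getD i []).length ↔ i < g.length := by
      rw [hsh.2 i]
      constructor
      · intro h
        by_contra hik
        rw [List.getD_eq_default _ _ (by omega : g.length ≤ i)] at h
        simp at h
      · intro hik
        have h1 := pre_rowlen g hPre i hik
        have h2 := hl k (by simp)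
        omega
    by_cases hp : p k = true
    · rw [if_pos hp]
      obtain ⟨sh2, hc⟩ := ih hlt (pvSet o i k w) (pvShape_pvSet g o i k w hsh)
      refine ⟨sh2, fun i' j' => ?_⟩
      rw [hc]
      simp only [pv_cell_pvSet, hkiff, List.mem_cons]
      by_cases hj' : j' = k <;> by_cases hi' : i' = i <;>
        split_ifs <;> simp_all
    · rw [if_neg hp]
      obtain ⟨sh2, hc⟩ := ih hlt o hsh
      refine ⟨sh2, fun i' j' => ?_⟩
      rw [hc]
      simp only [List.mem_cons]
      by_cases hj' : j' = k <;> by_cases hi' : i' = i <;>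
        split_ifs <;> simp_all

-- B's outer loop, for an arbitrary write predicate p and row value w
set_option maxHeartbeats 3200000 in
theorem bPass_cells (g : List (List Int)) (hPre : Pre_solve g)
    (p : Nat → Nat → Bool) (w : Nat → Int)
    (l : List Nat) (o : List (List Int)) (hsh : pvShape g o) :
    pvShape g (l.foldl (fun o i => (List.range (g.headD []).length).foldl
      (fun o j => if p i j then pvSet o i j (w i) else o) o) o) ∧
    ∀ i' j', pvCell (l.foldl (fun o i => (List.range (g.headD []).length).foldl
      (fun o j => if p i j then pvSet o i j (w i) else o) o) o) i' j' =
      if i' ∈ l ∧ i' < g.length ∧ j' < (g.headD []).length ∧ p i' j' = true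
      then w i' else pvCell o i' j' := by
  induction l generalizing o with
  | nil => exact ⟨hsh, by simp⟩
  | cons i0 t ih =>
    simp only [List.foldl_cons]
    obtain ⟨sh1, h1⟩ := bWrite_cells g hPre i0 (p i0) (w i0)
      (List.range (g.headD []).length) (by simp) o hsh
    obtain ⟨sh2, hc⟩ := ih _ sh1
    refine ⟨sh2, fun i' j' => ?_⟩
    rw [hc, h1 i' j']
    simp only [List.mem_range, List.mem_cons]
    by_cases hii : i' = i0 <;>
      by_cases hlen : i' < g.length <;>
      by_cases hC : j' < (g.headD []).length <;>
      by_cases hpp : p i' j' = true <;>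
      by_cases hit : i' ∈ t <;>
      split_ifs <;> simp_all <;> omega

set_option maxHeartbeats 1600000 in
theorem solve_alt_cells (g : List (List Int)) (hPre : Pre_solve g) :
    pvShape g (solve_alt g) ∧
    ∀ i j, i < g.length → j < (g.getD i []).length → pvCell (solve_alt g) i j = finalCell g i j := by
  have e : solve_alt g = (List.range g.length).foldl
      (fun o i => (List.range (g.headD []).length).foldl
        (fun o j => if bP g i j then pvSet o i j (bW g i) else o) o) (g.map (fun row => row)) := by
    unfold solve_alt
    apply foldl_congr_mem'
    intro o i _
    apply foldl_congr_mem'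
    intro o' j hj
    have hjC : j < (g.headD []).length := by simpa using hj
    have hcol : ((List.range (g.headD []).length).map
        (fun j => (List.range g.length).any (fun i => (g.getD i []).getD j 0 == 2))).getD j false =
        bCol2 g j := by
      rw [List.getD_eq_getElem _ false (by simpa using hjC), List.getElem_map, List.getElem_range]
      rfl
    cases hv : bV g i with
    | some v =>
      have : (((List.range (g.headD []).length).map (fun j => (g.getD i []).getD j 0)).find?
          (fun x => x == 1 || x == 3)) = some v := hv
      simp only [this, bP, bW, hv]
    | none =>
      have : (((List.range (g.headD []).length).map (fun j => (g.getD i []).getD j 0)).find?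
          (fun x => x == 1 || x == 3)) = none := hv
      simp only [this, bP, bW, hv, hcol]
  rw [e, List.map_id']
  obtain ⟨sh, hcells⟩ := bPass_cells g hPre (bP g) (bW g) (List.range g.length) g ⟨rfl, fun i => rfl⟩
  refine ⟨sh, fun i j hi hj => ?_⟩
  rw [hcells i j]
  have hrow := rowMap_take g hPre i hi
  have hvtake : bV g i = ((g.getD i []).take (g.headD []).length).find? (fun v => v == 1 || v == 3) := by
    unfold bV
    rw [hrow]
  have hcell : pvCell g i j = (g.getD i []).getD j 0 := rfl
  have hcol2any : (bCol2 g j = true) ↔ (g.any (fun row => row.getD j 0 == 2) = true) := by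
    rw [colAny_iff]
    unfold bCol2
    rw [List.any_eq_true]
    constructor
    · rintro ⟨i0, hi0, hp⟩
      exact ⟨i0, hi0, by simpa using hp⟩
    · rintro ⟨i0, hi0, hp⟩
      exact ⟨i0, hi0, by simpa using hp⟩
  cases hv : bV g i with
  | some v =>
    rw [finalCell_eq_some g i j v (by rw [← hvtake, hv])]
    unfold step1
    simp only [bP, bW, hv, hi, true_and, hcell]
    by_cases hjC : j < (g.headD []).length <;>
      by_cases h0 : (g.getD i []).getD j 0 = 0 <;>
      by_cases h2v : (g.getD i []).getD j 0 = 2 <;>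
      by_cases hA : g.any (fun row => row.getD j 0 == 2) = true <;>
      simp_all
  | none =>
    rw [finalCell_eq_none g i j (by rw [← hvtake, hv])]
    unfold step1
    simp only [bP, bW, hv, hi, true_and, hcell]
    by_cases hjC : j < (g.headD []).length <;>
      by_cases h0 : (g.getD i []).getD j 0 = 0 <;>
      by_cases hA : g.any (fun row => row.getD j 0 == 2) = true <;>
      simp_all

-- ===== VERDICT (by name: the statement is the Claim_ definition above) =====
theorem solve_spec : Claim_equal_solve := by
  intro g _ hPre
  unfold Spec_solve
  obtain ⟨shA, cA⟩ := solve_cells g hPre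
  obtain ⟨shB, cB⟩ := solve_alt_cells g hPre
  apply List.ext_getElem (by rw [shA.1, shB.1])
  intro i h1 h2
  have hiR : i < g.length := by rwa [shA.1] at h1
  have rowA : (solve g)[i] = (solve g).getD i [] := (List.getD_eq_getElem _ _ h1).symm
  have rowB : (solve_alt g)[i] = (solve_alt g).getD i [] := (List.getD_eq_getElem _ _ h2).symm
  rw [rowA, rowB]
  apply List.ext_getElem (by rw [shA.2 i, shB.2 i])
  intro j hj1 hj2
  have hjlen : j < (g.getD i []).length := by rwa [shA.2 i] at hj1
  have eA : ((solve g).getD i [])[j] = pvCell (solve g) i j := by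
    unfold pvCell; rw [List.getD_eq_getElem _ _ hj1]
  have eB : ((solve_alt g).getD i [])[j] = pvCell (solve_alt g) i j := by
    unfold pvCell; rw [List.getD_eq_getElem _ _ hj2]
  rw [eA, eB, cA i j, cB i j hiR hjlen]
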